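-- pv_equiv track=rewrite | github.com/carmit246/opsschool4-coding | age_to_bucket_parser.py | combine_people_by_ages
-- ===== SOURCE A (Python) =====
-- def combine_people_by_ages(buckets_list, ppl_ages_list):
--     min_age = 0
--     max_age = ppl_ages_list[-1][1]  # the value of the last element in the sorted list
--     buckets_list.insert(len(buckets_list), max_age)  # add to bucket of ages the maximum age
--     result = []
--     for num in buckets_list:
--         names = []
--         for name, age in ppl_ages_list:
--             if age in range(min_age, num):
--                 names.append(name)  # add names of people with age in range
--         result.append({str(min_age) + "-" + str(num): names})  # combine age ranges with names in list of dicts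
--         min_age = num
--     return result
-- ===== SOURCE B (Python) =====
-- def combine_people_by_ages(buckets_list, ppl_ages_list):
--     # same in-place mutation as the original: append the max age to buckets_list
--     buckets_list.insert(len(buckets_list), ppl_ages_list[-1][1])
--     # sort people (tagged with their original index) by age, once
--     s = sorted(enumerate(ppl_ages_list), key=lambda e: e[1][1])
--     ages = [e[1][1] for e in s]
--
--     def bisect_left(x):
--         # first position in ages whose value is >= x (hand-written: no imports in the module)
--         lo, hi = 0, len(ages)
--         while lo < hi:
--             mid = (lo + hi) // 2
--             if ages[mid] < x:
--                 lo = mid + 1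
--             else:
--                 hi = mid
--         return lo
--
--     result = []
--     prev = 0
--     for num in buckets_list:
--         # people with prev <= age < num form a contiguous slice of the sorted list
--         chunk = s[bisect_left(prev):bisect_left(num)]
--         # restore the original people order by sorting on the tagged index
--         entries = sorted(chunk, key=lambda e: e[0])
--         result.append({str(prev) + "-" + str(num): [e[1][0] for e in entries]})
--         prev = num
--     return result
-- ===== Notes on version B (the rewrite author's own statement) =====
-- stated objective: faster
-- what changed: A's bucket-major rescan of every person per bucket is replaced by sorting the index-tagged people by age once, binary-searching each bucket's half-open window as a contiguous slice of the sorted list, and restoring the original name order by sorting the slice on the tagged index.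
-- outside the precondition, e.g. on combine_people_by_ages([1], []): A raises IndexError, B raises IndexError
import Mathlib
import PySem

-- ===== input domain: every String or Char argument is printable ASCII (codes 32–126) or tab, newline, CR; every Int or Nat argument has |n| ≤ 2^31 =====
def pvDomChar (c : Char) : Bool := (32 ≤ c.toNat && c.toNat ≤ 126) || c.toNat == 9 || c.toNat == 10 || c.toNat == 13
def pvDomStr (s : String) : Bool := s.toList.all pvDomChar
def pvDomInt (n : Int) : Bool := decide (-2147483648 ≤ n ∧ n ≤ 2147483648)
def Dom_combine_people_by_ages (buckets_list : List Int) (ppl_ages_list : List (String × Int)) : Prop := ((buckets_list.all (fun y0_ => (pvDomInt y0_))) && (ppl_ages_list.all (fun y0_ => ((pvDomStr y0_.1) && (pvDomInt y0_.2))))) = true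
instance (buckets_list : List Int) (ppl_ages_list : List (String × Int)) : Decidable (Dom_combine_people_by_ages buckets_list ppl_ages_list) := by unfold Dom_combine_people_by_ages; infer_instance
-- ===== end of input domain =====

-- B replaces A's bucket-major rescan of every person per bucket by sort-once +
-- binary-searched contiguous slices of the age-sorted index-tagged list, re-ordered by
-- original index. Both A and B append the max age to buckets_list in place (the same
-- mutation); the equivalence proved here is about the return value.

-- ===== PORT A =====
def combine_people_by_ages (buckets_list : List Int) (ppl_ages_list : List (String × Int)) : List (List (String × List String)) :=
  match PySem.List.pyGet? ppl_ages_list (-1) with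
  | none => []  -- Python raises IndexError here (empty people list); excluded by Pre_
  | some last =>
    let bl := buckets_list ++ [last.2]
    (bl.foldl
      (fun (st : Int × List (List (String × List String))) num =>
        let names := ppl_ages_list.foldl
          (fun (ns : List String) p => if st.1 ≤ p.2 ∧ p.2 < num then ns ++ [p.1] else ns) []
        (num, st.2 ++ [[(PySem.Int.toStr st.1 ++ "-" ++ PySem.Int.toStr num, names)]]))
      (0, [])).2

-- ===== PORT B =====
-- Source B's hand-written bisect_left loop, transliterated (lo/hi live in Nat: they start at
-- 0 and len and only move towards each other, so (lo+hi)//2 on Nat is Python's // on these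
-- nonnegative ints; ages[mid] is ported as getD with an arbitrary default, exact because
-- lo ≤ mid < hi ≤ len ages whenever it is read)
def pvBisect (ages : List Int) (x : Int) (lo hi : Nat) : Nat :=
  if lo < hi then
    let mid := (lo + hi) / 2
    if ages.getD mid 0 < x then pvBisect ages x (mid + 1) hi
    else pvBisect ages x lo mid
  else lo
termination_by hi - lo
decreasing_by all_goals omega

def combine_people_by_ages_alt (buckets_list : List Int) (ppl_ages_list : List (String × Int)) : List (List (String × List String)) :=
  match PySem.List.pyGet? ppl_ages_list (-1) with
  | none => []  -- Python raises IndexError here (empty people list); excluded by Pre_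
  | some last =>
    let bl := buckets_list ++ [last.2]
    let s := PySem.List.sorted (PySem.List.enumerate ppl_ages_list 0) (fun e => e.2.2) false
    let ages := s.map (fun e => e.2.2)
    (bl.foldl
      (fun (st : Int × List (List (String × List String))) num =>
        let chunk := PySem.List.slice s (some ((pvBisect ages st.1 0 ages.length : Nat) : Int)) (some ((pvBisect ages num 0 ages.length : Nat) : Int))
        let entries := PySem.List.sorted chunk (fun e => e.1) false
        (num, st.2 ++ [[(PySem.Int.toStr st.1 ++ "-" ++ PySem.Int.toStr num, entries.map (fun e => e.2.1))]]))
      (0, [])).2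

-- ===== PRECONDITION & SPEC =====
-- Pre_ excludes only the empty people list, on which the Python A raises IndexError.
def Pre_combine_people_by_ages (buckets_list : List Int) (ppl_ages_list : List (String × Int)) : Prop := ppl_ages_list ≠ []
instance (buckets_list : List Int) (ppl_ages_list : List (String × Int)) : Decidable (Pre_combine_people_by_ages buckets_list ppl_ages_list) := by unfold Pre_combine_people_by_ages; infer_instance
def pvWitness_combine_people_by_ages : List Int × (List (String × Int)) := ([3, 5], [("a", 1), ("b", 4)])

def Spec_combine_people_by_ages (buckets_list : List Int) (ppl_ages_list : List (String × Int)) (out : List (List (String × List String))) : Prop := out = combine_people_by_ages_alt buckets_list ppl_ages_list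
instance (buckets_list : List Int) (ppl_ages_list : List (String × Int)) (out : List (List (String × List String))) : Decidable (Spec_combine_people_by_ages buckets_list ppl_ages_list out) := by unfold Spec_combine_people_by_ages; infer_instance

-- ===== CLAIM (what is proved, stated in full; the proofs are below) =====
def Claim_equal_combine_people_by_ages : Prop := ∀ (buckets_list : List Int) (ppl_ages_list : List (String × Int)), Dom_combine_people_by_ages buckets_list ppl_ages_list → Pre_combine_people_by_ages buckets_list ppl_ages_list → Spec_combine_people_by_ages buckets_list ppl_ages_list (combine_people_by_ages buckets_list ppl_ages_list)

-- ===== LEMMAS AND PROOFS =====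

-- the sequence of (lo, hi) interval bounds generated by a boundary list from start m
def pvRecBounds : List Int → Int → List (Int × Int)
  | [], _ => []
  | hi :: t, m => (m, hi) :: pvRecBounds t hi

-- the names one of A's buckets collects, exactly as A's inner fold computes them
def pvNames (ppl : List (String × Int)) (b : Int × Int) : List String :=
  ppl.foldl (fun (ns : List String) p => if b.1 ≤ p.2 ∧ p.2 < b.2 then ns ++ [p.1] else ns) []

def pvCell (ppl : List (String × Int)) (b : Int × Int) : List (String × List String) :=
  [(PySem.Int.toStr b.1 ++ "-" ++ PySem.Int.toStr b.2, pvNames ppl b)]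

-- one of B's buckets, as B's loop body computes it from the age-sorted tagged list
def pvCellB (ppl : List (String × Int)) (b : Int × Int) : List (String × List String) :=
  let s := PySem.List.sorted (PySem.List.enumerate ppl 0) (fun e => e.2.2) false
  let ages := s.map (fun e => e.2.2)
  let chunk := PySem.List.slice s (some ((pvBisect ages b.1 0 ages.length : Nat) : Int)) (some ((pvBisect ages b.2 0 ages.length : Nat) : Int))
  [(PySem.Int.toStr b.1 ++ "-" ++ PySem.Int.toStr b.2, (PySem.List.sorted chunk (fun e => e.1) false).map (fun e => e.2.1))]

theorem pvFoldA (ppl : List (String × Int)) (bl : List Int) (m : Int)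
    (acc : List (List (String × List String))) :
    (bl.foldl
      (fun (st : Int × List (List (String × List String))) num =>
        let names := ppl.foldl
          (fun (ns : List String) p => if st.1 ≤ p.2 ∧ p.2 < num then ns ++ [p.1] else ns) []
        (num, st.2 ++ [[(PySem.Int.toStr st.1 ++ "-" ++ PySem.Int.toStr num, names)]]))
      (m, acc)).2 = acc ++ (pvRecBounds bl m).map (pvCell ppl) := by
  induction bl generalizing m acc with
  | nil => simp [pvRecBounds]
  | cons hi t ih =>
    simp only [List.foldl_cons, pvRecBounds, List.map_cons]
    rw [ih]
    simp [pvCell, pvNames]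

theorem pvFoldB (ppl : List (String × Int)) (bl : List Int) (m : Int)
    (acc : List (List (String × List String))) :
    (bl.foldl
      (fun (st : Int × List (List (String × List String))) num =>
        let chunk := PySem.List.slice (PySem.List.sorted (PySem.List.enumerate ppl 0) (fun e => e.2.2) false)
          (some ((pvBisect ((PySem.List.sorted (PySem.List.enumerate ppl 0) (fun e => e.2.2) false).map (fun e => e.2.2)) st.1 0 ((PySem.List.sorted (PySem.List.enumerate ppl 0) (fun e => e.2.2) false).map (fun e => e.2.2)).length : Nat) : Int))
          (some ((pvBisect ((PySem.List.sorted (PySem.List.enumerate ppl 0) (fun e => e.2.2) false).map (fun e => e.2.2)) num 0 ((PySem.List.sorted (PySem.List.enumerate ppl 0) (fun e => e.2.2) false).map (fun e => e.2.2)).length : Nat) : Int))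
        let entries := PySem.List.sorted chunk (fun e => e.1) false
        (num, st.2 ++ [[(PySem.Int.toStr st.1 ++ "-" ++ PySem.Int.toStr num, entries.map (fun e => e.2.1))]]))
      (m, acc)).2 = acc ++ (pvRecBounds bl m).map (pvCellB ppl) := by
  induction bl generalizing m acc with
  | nil => simp [pvRecBounds]
  | cons hi t ih =>
    simp only [List.foldl_cons, pvRecBounds, List.map_cons]
    rw [ih]
    simp [pvCellB]

-- pvBisect, run on a nondecreasing list, lands at the first index whose value is ≥ x
theorem pvBisect_spec (ages : List Int) (x : Int) (lo hi : Nat) :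
    ages.Pairwise (· ≤ ·) → hi ≤ ages.length → lo ≤ hi →
    (∀ j (_ : j < ages.length), j < lo → ages[j] < x) →
    (∀ j (_ : j < ages.length), hi ≤ j → x ≤ ages[j]) →
    pvBisect ages x lo hi ≤ ages.length ∧
    (∀ j (_ : j < ages.length), j < pvBisect ages x lo hi → ages[j] < x) ∧
    (∀ j (_ : j < ages.length), pvBisect ages x lo hi ≤ j → x ≤ ages[j]) := by
  fun_induction pvBisect ages x lo hi with
  | case1 lo hi hlt mid hmidlt ih =>
    intro hpair hhi hlohi hlo hup
    have hpg := List.pairwise_iff_getElem.mp hpair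
    have hmlen : mid < ages.length := by omega
    have hmid : ages[mid] < x := by
      have : ages.getD mid 0 = ages[mid] := List.getD_eq_getElem ages 0 hmlen
      omega
    refine ih hpair hhi (by omega) ?_ hup
    intro j hj hjm
    rcases Nat.lt_or_ge j mid with h | h
    · exact lt_of_le_of_lt (hpg j mid hj hmlen h) hmid
    · have : j = mid := by omega
      simpa [this] using hmid
  | case2 lo hi hlt mid hmidge ih =>
    intro hpair hhi hlohi hlo hup
    have hpg := List.pairwise_iff_getElem.mp hpair
    have hmlen : mid < ages.length := by omega
    have hmid : x ≤ ages[mid] := by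
      have : ages.getD mid 0 = ages[mid] := List.getD_eq_getElem ages 0 hmlen
      omega
    refine ih hpair (by omega) (by omega) hlo ?_
    intro j hj hjm
    rcases Nat.lt_or_ge mid j with h | h
    · exact le_trans hmid (hpg mid j hmlen hj h)
    · have : j = mid := by omega
      simpa [this] using hmid
  | case3 lo hi hnlt =>
    intro hpair hhi hlohi hlo hup
    exact ⟨by omega, fun j hj hjlo => hlo j hj hjlo, fun j hj hloj => hup j hj (by omega)⟩

theorem pvTakeWhile_take {α : Type} (p : α → Bool) (s : List α) (n : Nat)
    (hn : n ≤ s.length) (h : ∀ j (_ : j < s.length), (p s[j] = true ↔ j < n)) :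
    s.takeWhile p = s.take n ∧ s.dropWhile p = s.drop n := by
  induction s generalizing n with
  | nil => simp at hn; simp [hn]
  | cons a t ih =>
    cases n with
    | zero =>
      have ha : p a = false := by
        have := h 0 (by simp)
        simpa using this
      simp [ha]
    | succ m =>
      have ha : p a = true := by
        have := h 0 (by simp)
        simpa using this
      have ih' := ih m (by simpa using hn) (fun j hj => by
        have := h (j + 1) (by simpa using Nat.succ_lt_succ hj)
        simpa using this)
      simp [ha, ih'.1, ih'.2]

theorem pvDropWhile_filter (key : Int × (String × Int) → Int) (x : Int) (s : List (Int × (String × Int)))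
    (hpair : s.Pairwise (fun a b => key a ≤ key b)) :
    s.dropWhile (fun e => decide (key e < x)) = s.filter (fun e => decide (x ≤ key e)) := by
  induction s with
  | nil => rfl
  | cons a t ih =>
    rcases List.pairwise_cons.mp hpair with ⟨ha, hp⟩
    by_cases hax : key a < x
    · simp [hax, not_le.mpr hax, ih hp]
    · have : t.filter (fun e => decide (x ≤ key e)) = t := by
        apply List.filter_eq_self.mpr
        intro e he
        exact decide_eq_true (le_trans (not_lt.mp hax) (ha e he))
      simp [hax, not_lt.mp hax, this]

theorem pvTakeWhile_filter (key : Int × (String × Int) → Int) (y : Int) (s : List (Int × (String × Int)))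
    (hpair : s.Pairwise (fun a b => key a ≤ key b)) :
    s.takeWhile (fun e => decide (key e < y)) = s.filter (fun e => decide (key e < y)) := by
  induction s with
  | nil => rfl
  | cons a t ih =>
    rcases List.pairwise_cons.mp hpair with ⟨ha, hp⟩
    by_cases hay : key a < y
    · simp [hay, ih hp]
    · have : t.filter (fun e => decide (key e < y)) = [] := by
        apply List.filter_eq_nil_iff.mpr
        intro e he
        simpa using not_lt.mpr (le_trans (not_lt.mp hay) (ha e he))
      simp [hay, this]

-- a half-open key window of a key-sorted list is a contiguous slice
theorem pvSeg_filter (key : Int × (String × Int) → Int) (x y : Int) (s : List (Int × (String × Int)))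
    (hpair : s.Pairwise (fun a b => key a ≤ key b)) (i1 i2 : Nat)
    (h1len : i1 ≤ s.length) (h2len : i2 ≤ s.length)
    (h1 : ∀ j (_ : j < s.length), (key s[j] < x ↔ j < i1))
    (h2 : ∀ j (_ : j < s.length), (key s[j] < y ↔ j < i2)) :
    (s.drop i1).take (i2 - i1) = s.filter (fun e => decide (x ≤ key e ∧ key e < y)) := by
  have hd : s.dropWhile (fun e => decide (key e < x)) = s.drop i1 :=
    (pvTakeWhile_take _ s i1 h1len (fun j hj => by simpa using h1 j hj)).2
  have ht : (s.drop i1).takeWhile (fun e => decide (key e < y)) = (s.drop i1).take (i2 - i1) := by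
    refine (pvTakeWhile_take _ (s.drop i1) (i2 - i1) (by simp; omega) (fun j hj => ?_)).1
    have hjl : i1 + j < s.length := by simp at hj; omega
    have := h2 (i1 + j) hjl
    simp only [List.getElem_drop]
    constructor
    · intro hh; have := this.mp (by simpa using hh); omega
    · intro hh; exact decide_eq_true (this.mpr (by omega))
  have hsub : (s.drop i1).Pairwise (fun a b => key a ≤ key b) :=
    hpair.sublist (List.drop_sublist i1 s)
  calc (s.drop i1).take (i2 - i1)
      = (s.drop i1).takeWhile (fun e => decide (key e < y)) := ht.symm
    _ = (s.drop i1).filter (fun e => decide (key e < y)) := pvTakeWhile_filter key y _ hsub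
    _ = (s.dropWhile (fun e => decide (key e < x))).filter (fun e => decide (key e < y)) := by rw [hd]
    _ = (s.filter (fun e => decide (x ≤ key e))).filter (fun e => decide (key e < y)) := by rw [pvDropWhile_filter key x s hpair]
    _ = s.filter (fun e => decide (x ≤ key e ∧ key e < y)) := by
        rw [List.filter_filter]
        apply List.filter_congr
        intro e _
        rw [Bool.and_comm]; simp

theorem pvEnumFilterMap (x y : Int) (ppl : List (String × Int)) (st : Int) :
    ((PySem.List.enumerate ppl st).filter (fun e => decide (x ≤ e.2.2 ∧ e.2.2 < y))).map (fun e => e.2.1)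
      = (ppl.filter (fun p => decide (x ≤ p.2 ∧ p.2 < y))).map (fun p => p.1) := by
  induction ppl generalizing st with
  | nil => rfl
  | cons p t ih =>
    rw [PySem.List.enumerate_cons, List.filter_cons, List.filter_cons]
    by_cases hp : x ≤ p.2 ∧ p.2 < y
    · rw [if_pos (by simpa using hp), if_pos (by simpa using hp), List.map_cons, List.map_cons, ih]
    · rw [if_neg (by simpa using hp), if_neg (by simpa using hp), ih]

theorem pvNames_eq_filter (ppl : List (String × Int)) (x y : Int) :
    pvNames ppl (x, y) = (ppl.filter (fun p => decide (x ≤ p.2 ∧ p.2 < y))).map (fun p => p.1) := by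
  unfold pvNames
  have : (fun (ns : List String) (p : String × Int) => if x ≤ p.2 ∧ p.2 < y then ns ++ [p.1] else ns)
       = (fun ns p => if (fun (p : String × Int) => decide (x ≤ p.2 ∧ p.2 < y)) p then ns ++ [p.1] else ns) := by
    funext ns p; by_cases h : x ≤ p.2 ∧ p.2 < y <;> simp [h]
  rw [this, PySem.List.foldl_append_if]
  simp

theorem pvCell_eq (ppl : List (String × Int)) (b : Int × Int) :
    pvCell ppl b = pvCellB ppl b := by
  obtain ⟨x, y⟩ := b
  unfold pvCell pvCellB
  simp only
  congr 1
  congr 1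
  set E := PySem.List.enumerate ppl 0 with hE
  set s := PySem.List.sorted E (fun e => e.2.2) false with hs
  set ages := s.map (fun e => e.2.2) with hages
  have hperm : s.Perm E := PySem.List.sorted_perm E (fun e => e.2.2) false
  have hpair : s.Pairwise (fun a b => a.2.2 ≤ b.2.2) := PySem.List.sorted_pairwise E (fun e => e.2.2)
  have hpairA : ages.Pairwise (· ≤ ·) := List.pairwise_map.mpr hpair
  have hlen : ages.length = s.length := by simp [hages]
  have hspec := fun z => pvBisect_spec ages z 0 ages.length hpairA le_rfl (Nat.zero_le _)
      (fun j hj hj0 => absurd hj0 (Nat.not_lt_zero j)) (fun j hj hle => absurd hj (by omega))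
  have hiff : ∀ z, ∀ j (hj : j < s.length), (s[j].2.2 < z ↔ j < pvBisect ages z 0 ages.length) := by
    intro z j hj
    obtain ⟨hle, hbelow, habove⟩ := hspec z
    have hja : j < ages.length := by omega
    have hv : ages[j] = s[j].2.2 := by simp [hages]
    constructor
    · intro hlt
      by_contra hnot
      have := habove j hja (by omega)
      omega
    · intro hlt
      have := hbelow j hja hlt
      omega
  have hi1 := (hspec x).1
  have hi2 := (hspec y).1
  have hchunk : PySem.List.slice s (some ((pvBisect ages x 0 ages.length : Nat) : Int)) (some ((pvBisect ages y 0 ages.length : Nat) : Int))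
      = s.filter (fun e => decide (x ≤ e.2.2 ∧ e.2.2 < y)) := by
    rw [PySem.List.slice_natCast]
    exact pvSeg_filter (fun e => e.2.2) x y s hpair _ _ (by omega) (by omega) (hiff x) (hiff y)
  rw [hchunk]
  have hsorted : PySem.List.sorted (s.filter (fun e => decide (x ≤ e.2.2 ∧ e.2.2 < y))) (fun e => e.1) false
      = E.filter (fun e => decide (x ≤ e.2.2 ∧ e.2.2 < y)) := by
    apply PySem.List.sorted_eq_of_perm_of_pairwise_lt
    · exact ((hperm.filter _)).symm
    · exact List.Pairwise.sublist List.filter_sublist (PySem.List.pairwise_lt_enumerate ppl 0)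
  rw [hsorted, pvNames_eq_filter, pvEnumFilterMap]

-- ===== VERDICT (by name: the statement is the Claim_ definition above) =====
theorem combine_people_by_ages_spec : Claim_equal_combine_people_by_ages := by
  intro buckets_list ppl_ages_list _ _
  unfold Spec_combine_people_by_ages combine_people_by_ages combine_people_by_ages_alt
  cases h : PySem.List.pyGet? ppl_ages_list (-1) with
  | none => rfl
  | some last =>
    simp only
    rw [pvFoldA, pvFoldB]
    simp only [List.nil_append]
    exact List.map_congr_left (fun b _ => pvCell_eq ppl_ages_list b)
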